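-- pv_equiv track=rewrite | github.com/aubin-tchoi/gonggi | gonggi/simulation/cost.py | find_player_score
-- ===== SOURCE A (Python) =====
-- def find_player_score(
--     size: int, player_grid: list[list[int]], remove_stacking: bool = False
-- ) -> int:
--     """
--     Finds out the score associated with a grid.
--     """
--     return (
--         sum(dice for col in range(len(player_grid)) for dice in player_grid[col])
--         if remove_stacking
--         else sum(
--             dice * player_grid[col].count(dice) ** 2
--             for col in range(size)
--             for dice in set(player_grid[col])
--         )
--     )
-- ===== SOURCE B (Python) =====
-- def find_player_score(
--     size: int, player_grid: list[list[int]], remove_stacking: bool = False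
-- ) -> int:
--     """
--     Finds out the score associated with a grid (sort-then-run-length scan
--     instead of set-of-distinct-values plus repeated .count() rescans).
--     """
--     if remove_stacking:
--         return sum(sum(col) for col in player_grid)
--     total = 0
--     for col in range(size):
--         column = sorted(player_grid[col])
--         i = 0
--         n = len(column)
--         while i < n:
--             j = i + 1
--             while j < n and column[j] == column[i]:
--                 j += 1
--             total += column[i] * (j - i) ** 2
--             i = j
--     return total
-- ===== Notes on version B (the rewrite author's own statement) =====
-- stated objective: alternative
-- what changed: The non-stacking branch no longer builds a set of distinct values and rescans the column with .count() for each of them; instead each column is sorted once and scanned linearly, adding v*run_length**2 for every run of equal values.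
import Mathlib
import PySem

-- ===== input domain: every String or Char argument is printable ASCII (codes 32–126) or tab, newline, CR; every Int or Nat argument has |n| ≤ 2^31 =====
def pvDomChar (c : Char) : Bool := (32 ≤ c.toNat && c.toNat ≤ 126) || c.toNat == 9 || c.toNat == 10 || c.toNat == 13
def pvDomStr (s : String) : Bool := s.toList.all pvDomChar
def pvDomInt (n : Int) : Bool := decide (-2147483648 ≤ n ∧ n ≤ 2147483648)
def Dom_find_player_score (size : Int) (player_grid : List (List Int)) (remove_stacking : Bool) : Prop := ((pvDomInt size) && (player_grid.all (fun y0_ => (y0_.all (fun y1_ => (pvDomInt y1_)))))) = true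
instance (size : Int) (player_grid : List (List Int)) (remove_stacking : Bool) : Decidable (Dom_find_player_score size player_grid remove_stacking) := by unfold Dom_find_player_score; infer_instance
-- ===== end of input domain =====

-- B replaces the set-of-distinct-values + repeated .count() rescans of each column by a
-- single sort-then-run-length scan per column.

-- ===== PORT A =====
def find_player_score (size : Int) (player_grid : List (List Int)) (remove_stacking : Bool) : Int :=
  if remove_stacking then
    ((PySem.List.pyRange 0 player_grid.length 1).flatMap
      (fun col => PySem.List.pyGetD player_grid col [])).sum
  else
    ((PySem.List.pyRange 0 size 1).flatMap
      (fun col =>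
        (PySem.Set.ofList (PySem.List.pyGetD player_grid col [])).map
          (fun dice => dice * ((PySem.List.pyGetD player_grid col []).count dice : Int) ^ 2))).sum

-- ===== PORT B =====
-- inner while loop of Source B: walk the sorted column run by run, adding value * run_length^2
def pvRunScore : List Int → Int
  | [] => 0
  | x :: xs =>
      x * (((xs.takeWhile (fun y => y == x)).length : Int) + 1) ^ 2
        + pvRunScore (xs.dropWhile (fun y => y == x))
termination_by l => l.length
decreasing_by
  simpa using Nat.lt_succ_of_le (List.length_dropWhile_le _ _)

def find_player_score_alt (size : Int) (player_grid : List (List Int)) (remove_stacking : Bool) : Int :=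
  if remove_stacking then
    (player_grid.map (fun col => col.sum)).sum
  else
    (PySem.List.pyRange 0 size 1).foldl
      (fun total col =>
        total + pvRunScore (PySem.List.sorted (PySem.List.pyGetD player_grid col []) (fun x => x) false))
      0

-- ===== PRECONDITION & SPEC =====
-- Pre_ excludes exactly the inputs where the Python A raises IndexError (non-stacking
-- branch with size exceeding the number of columns); B raises there too.
def Pre_find_player_score (size : Int) (player_grid : List (List Int)) (remove_stacking : Bool) : Prop :=
  remove_stacking = true ∨ size ≤ (player_grid.length : Int)
instance (size : Int) (player_grid : List (List Int)) (remove_stacking : Bool) : Decidable (Pre_find_player_score size player_grid remove_stacking) := by unfold Pre_find_player_score; infer_instance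

def pvWitness_find_player_score : Int × List (List Int) × Bool := (2, [[3, 3, 1], [2]], false)

def Spec_find_player_score (size : Int) (player_grid : List (List Int)) (remove_stacking : Bool) (out : Int) : Prop := out = find_player_score_alt size player_grid remove_stacking
instance (size : Int) (player_grid : List (List Int)) (remove_stacking : Bool) (out : Int) : Decidable (Spec_find_player_score size player_grid remove_stacking out) := by unfold Spec_find_player_score; infer_instance

-- ===== CLAIM (what is proved, stated in full; the proofs are below) =====
def Claim_equal_find_player_score : Prop := ∀ (size : Int) (player_grid : List (List Int)) (remove_stacking : Bool), Dom_find_player_score size player_grid remove_stacking → Pre_find_player_score size player_grid remove_stacking → Spec_find_player_score size player_grid remove_stacking (find_player_score size player_grid remove_stacking)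

-- ===== LEMMAS AND PROOFS =====

-- the list of run heads of a list (for a sorted list: its distinct values, in order)
def pvHeads : List Int → List Int
  | [] => []
  | x :: xs => x :: pvHeads (xs.dropWhile (fun y => y == x))
termination_by l => l.length
decreasing_by
  simpa using Nat.lt_succ_of_le (List.length_dropWhile_le _ _)

theorem pv_not_mem_dropWhile (xs : List Int) (x : Int)
    (h : (x :: xs).Pairwise (· ≤ ·)) : x ∉ xs.dropWhile (fun y => y == x) := by
  induction xs with
  | nil => simp
  | cons y ys ih =>
    by_cases hy : (y == x) = true
    · rw [show List.dropWhile (fun y => y == x) (y :: ys) = List.dropWhile (fun y => y == x) ys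
        from List.dropWhile_cons_of_pos hy]
      apply ih
      rcases List.pairwise_cons.1 h with ⟨hx, hrest⟩
      exact List.pairwise_cons.2 ⟨fun a ha => hx a (List.mem_cons_of_mem _ ha),
        (List.pairwise_cons.1 hrest).2⟩
    · rw [show List.dropWhile (fun y => y == x) (y :: ys) = y :: ys
        from List.dropWhile_cons_of_neg hy]
      intro hmem
      rcases List.mem_cons.1 hmem with rfl | hmem
      · simp at hy
      · have h1 : x ≤ y := (List.pairwise_cons.1 h).1 y (by simp)
        have h2 : y ≤ x := (List.pairwise_cons.1 ((List.pairwise_cons.1 h).2)).1 x hmem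
        have : y = x := le_antisymm h2 h1
        simp [this] at hy

theorem pv_mem_heads (s : List Int) : ∀ a, a ∈ pvHeads s ↔ a ∈ s := by
  induction s using pvHeads.induct with
  | case1 => simp [pvHeads]
  | case2 x xs ih =>
    intro a
    rw [pvHeads]
    constructor
    · intro h
      rcases List.mem_cons.1 h with rfl | h
      · simp
      · exact List.mem_cons_of_mem _ ((List.dropWhile_sublist _).mem ((ih a).1 h))
    · intro h
      rcases List.mem_cons.1 h with rfl | h
      · simp
      · rw [← List.takeWhile_append_dropWhile (p := fun y => y == x) (l := xs)] at h
        rcases List.mem_append.1 h with h | h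
        · have : (a == x) = true := List.mem_takeWhile_imp (p := fun y => y == x) h
          simp at this
          simp [this]
        · exact List.mem_cons_of_mem _ ((ih a).2 h)

theorem pv_heads_nodup (s : List Int) (h : s.Pairwise (· ≤ ·)) : (pvHeads s).Nodup := by
  induction s using pvHeads.induct with
  | case1 => simp [pvHeads]
  | case2 x xs ih =>
    rw [pvHeads]
    refine List.nodup_cons.2 ⟨?_, ih (List.Pairwise.sublist (List.dropWhile_sublist _) (List.pairwise_cons.1 h).2)⟩
    rw [pv_mem_heads]
    exact pv_not_mem_dropWhile xs x h

theorem pv_runScore_eq (s : List Int) (h : s.Pairwise (· ≤ ·)) :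
    pvRunScore s = ((pvHeads s).map (fun d => d * (s.count d : Int) ^ 2)).sum := by
  induction s using pvHeads.induct with
  | case1 => simp [pvHeads, pvRunScore]
  | case2 x xs ih =>
    have hxs : xs.Pairwise (· ≤ ·) := (List.pairwise_cons.1 h).2
    have hr : (xs.dropWhile (fun y => y == x)).Pairwise (· ≤ ·) :=
      List.Pairwise.sublist (List.dropWhile_sublist _) hxs
    have hxnr : x ∉ xs.dropWhile (fun y => y == x) := pv_not_mem_dropWhile xs x h
    have hsplit : xs.takeWhile (fun y => y == x) ++ xs.dropWhile (fun y => y == x) = xs :=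
      List.takeWhile_append_dropWhile
    have htall : ∀ y ∈ xs.takeWhile (fun y => y == x), y = x := by
      intro y hy
      have := List.mem_takeWhile_imp (p := fun y => y == x) hy
      simpa using this
    have hcx : (x :: xs).count x = (xs.takeWhile (fun y => y == x)).length + 1 := by
      have h1 : (xs.takeWhile (fun y => y == x)).count x = (xs.takeWhile (fun y => y == x)).length := by
        rw [List.count_eq_length]
        intro y hy; simpa using (htall y hy).symm
      have h2 : (xs.dropWhile (fun y => y == x)).count x = 0 := List.count_eq_zero.2 hxnr
      have h3 : xs.count x = (xs.takeWhile (fun y => y == x)).count x + (xs.dropWhile (fun y => y == x)).count x := by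
        conv_lhs => rw [← hsplit]
        exact List.count_append ..
      rw [List.count_cons_self]
      omega
    have hcd : ∀ d ∈ pvHeads (xs.dropWhile (fun y => y == x)),
        (x :: xs).count d = (xs.dropWhile (fun y => y == x)).count d := by
      intro d hd
      have hdr : d ∈ xs.dropWhile (fun y => y == x) := (pv_mem_heads _ d).1 hd
      have hdx : d ≠ x := fun hdx => hxnr (hdx ▸ hdr)
      have h1 : (xs.takeWhile (fun y => y == x)).count d = 0 :=
        List.count_eq_zero.2 (fun hmem => hdx (htall d hmem))
      have h3 : xs.count d = (xs.takeWhile (fun y => y == x)).count d + (xs.dropWhile (fun y => y == x)).count d := by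
        conv_lhs => rw [← hsplit]
        exact List.count_append ..
      have h4 : (x :: xs).count d = xs.count d := by
        simp [Ne.symm hdx]
      omega
    rw [pvRunScore, pvHeads, List.map_cons, List.sum_cons, hcx,
      List.map_congr_left (fun d hd => by rw [hcd d hd] :
        ∀ d ∈ pvHeads (xs.dropWhile (fun y => y == x)),
          d * (((x :: xs).count d : Int)) ^ 2 = d * (((xs.dropWhile (fun y => y == x)).count d : Int)) ^ 2),
      ← ih hr]
    push_cast; ring

-- per-column equality: A's set-of-distinct-values sum = B's run scan over the sorted column
theorem pv_col (L : List Int) :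
    ((PySem.Set.ofList L).map (fun d => d * (L.count d : Int) ^ 2)).sum
      = pvRunScore (PySem.List.sorted L (fun x => x) false) := by
  have hperm : (PySem.List.sorted L (fun x => x) false).Perm L := PySem.List.sorted_perm ..
  have hp : (PySem.List.sorted L (fun x => x) false).Pairwise (· ≤ ·) :=
    PySem.List.sorted_pairwise ..
  rw [pv_runScore_eq _ hp]
  rw [List.map_congr_left (fun d _ => by rw [hperm.count_eq] :
    ∀ d ∈ pvHeads (PySem.List.sorted L (fun x => x) false),
      d * (((PySem.List.sorted L (fun x => x) false).count d : Int)) ^ 2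
        = d * ((L.count d : Int)) ^ 2)]
  refine List.Perm.sum_eq (List.Perm.map _ ?_)
  refine (List.perm_ext_iff_of_nodup (PySem.Set.nodup_ofList ..) ?_).2 ?_
  · exact pv_heads_nodup _ hp
  · intro a
    rw [PySem.Set.mem_ofList, pv_mem_heads, hperm.mem_iff]

-- ===== VERDICT (by name: the statement is the Claim_ definition above) =====
theorem find_player_score_spec : Claim_equal_find_player_score := by
  intro size player_grid remove_stacking _ _
  unfold Spec_find_player_score find_player_score find_player_score_alt
  cases remove_stacking with
  | true =>
    simp only [ite_true]
    rw [List.flatMap_def, PySem.List.map_pyGetD_pyRange_zero', List.sum_flatten]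
  | false =>
    simp only [Bool.false_eq_true, ite_false]
    rw [PySem.List.foldl_add, zero_add]
    simp only [List.flatMap_def, List.sum_flatten, List.map_map, Function.comp_def]
    exact congrArg List.sum (List.map_congr_left (fun c _ => pv_col _))
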